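-- pv_equiv track=rewrite | github.com/andre-massa/percolacao_clusters | percolacao.py | step_sir
-- ===== SOURCE A (Python) =====
-- def step_sir(sir_grid, n):
--     """
--     Executa um passo da simulação SIR determinística:
--         - Cada infectado (2) infecta todos os vizinhos suscetíveis (1) em cruz (4-conectividade)
--         - Depois passa imediatamente para recuperado (3)
--
--     Retorna:
--         new_grid      : nova grade SIR após o passo
--         newly_infected: número de novas infecções neste passo
--         has_active    : True se ainda há infectados ativos
--     """
--     new_grid = list(sir_grid)
--     newly_infected = 0
--     has_active = False
--
--     for i in range(n * n):
--         if sir_grid[i] != 2: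
--             continue
--         has_active = True
--         r, c = divmod(i, n)
--
--         # infecta vizinhos suscetíveis (4-conectividade)
--         neighbors = []
--         if r > 0:     neighbors.append(i - n)
--         if r < n - 1: neighbors.append(i + n)
--         if c > 0:     neighbors.append(i - 1)
--         if c < n - 1: neighbors.append(i + 1)
--
--         for nb in neighbors:
--             if sir_grid[nb] == 1 and new_grid[nb] == 1:
--                 new_grid[nb] = 2
--                 newly_infected += 1
--
--         # infectado passa a recuperado no mesmo passo
--         new_grid[i] = 3
--
--     return new_grid, newly_infected, has_active
-- ===== SOURCE B (Python) =====
-- def step_sir(sir_grid, n):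
--     """Pull-based deterministic SIR step: each cell computes its own next state
--     from the ORIGINAL grid, so no dedup guard is needed."""
--     m = n * n
--
--     def infected_neighbor(i):
--         r, c = divmod(i, n)
--         return ((r > 0 and sir_grid[i - n] == 2) or
--                 (r < n - 1 and sir_grid[i + n] == 2) or
--                 (c > 0 and sir_grid[i - 1] == 2) or
--                 (c < n - 1 and sir_grid[i + 1] == 2))
--
--     new_grid = []
--     newly_infected = 0
--     has_active = False
--     for i in range(m):
--         v = sir_grid[i]
--         if v == 2:
--             new_grid.append(3)
--             has_active = True
--         elif v == 1 and infected_neighbor(i):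
--             new_grid.append(2)
--             newly_infected += 1
--         else:
--             new_grid.append(v)
--     new_grid.extend(sir_grid[m:])
--     return new_grid, newly_infected, has_active
-- ===== Notes on version B (the rewrite author's own statement) =====
-- stated objective: alternative
-- what changed: Push reformulated as pull: instead of each infected cell writing into its neighbors with a dedup guard on the partially-updated grid, every cell computes its own next state in one pass reading only the original grid, so each newly infected cell is decided and counted exactly once.
import Mathlib
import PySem

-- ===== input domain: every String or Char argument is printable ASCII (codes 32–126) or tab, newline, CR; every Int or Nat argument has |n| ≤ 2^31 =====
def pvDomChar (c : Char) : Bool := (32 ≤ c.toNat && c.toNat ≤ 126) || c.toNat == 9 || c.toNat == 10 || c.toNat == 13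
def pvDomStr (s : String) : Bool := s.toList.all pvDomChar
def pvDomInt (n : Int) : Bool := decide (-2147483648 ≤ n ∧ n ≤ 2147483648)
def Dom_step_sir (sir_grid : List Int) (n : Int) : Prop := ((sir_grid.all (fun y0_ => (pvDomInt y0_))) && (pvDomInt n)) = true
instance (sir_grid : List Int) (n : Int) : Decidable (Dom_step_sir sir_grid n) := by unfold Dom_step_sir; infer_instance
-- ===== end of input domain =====

-- One deterministic SIR step. B replaces A's push loop (each infected cell writing into the
-- neighbours of a partially-updated grid, with a dedup guard) by a pull pass that decides every
-- cell once from the original grid (objective: alternative decomposition, same O(n^2) cost).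

-- ===== PORT A =====
def nbrsA (n i : Int) : List Int :=
  let r := PySem.Int.floordiv i n
  let c := PySem.Int.mod i n
  (if 0 < r then [i - n] else []) ++ (if r < n - 1 then [i + n] else []) ++
  (if 0 < c then [i - 1] else []) ++ (if c < n - 1 then [i + 1] else [])

def stepAInner (sir : List Int) (p : List Int × Int) (nb : Int) : List Int × Int :=
  if PySem.List.pyGetD sir nb 0 = 1 ∧ PySem.List.pyGetD p.1 nb 0 = 1 then
    (PySem.List.pySetD p.1 nb 2, p.2 + 1)
  else p

def stepAOut (sir : List Int) (n : Int) (st : List Int × Int × Bool) (i : Int) :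
    List Int × Int × Bool :=
  if PySem.List.pyGetD sir i 0 ≠ 2 then st
  else
    let p := (nbrsA n i).foldl (stepAInner sir) (st.1, st.2.1)
    (PySem.List.pySetD p.1 i 3, p.2, true)

def step_sir (sir_grid : List Int) (n : Int) : List Int × Int × Bool :=
  (PySem.List.pyRange 0 (n * n) 1).foldl (stepAOut sir_grid n) (sir_grid, 0, false)

-- ===== PORT B =====
def infNbB (sir : List Int) (n i : Int) : Bool :=
  let r := PySem.Int.floordiv i n
  let c := PySem.Int.mod i n
  (decide (0 < r) && (PySem.List.pyGetD sir (i - n) 0 == 2)) ||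
  (decide (r < n - 1) && (PySem.List.pyGetD sir (i + n) 0 == 2)) ||
  (decide (0 < c) && (PySem.List.pyGetD sir (i - 1) 0 == 2)) ||
  (decide (c < n - 1) && (PySem.List.pyGetD sir (i + 1) 0 == 2))

def stepBOut (sir : List Int) (n : Int) (st : List Int × Int × Bool) (i : Int) :
    List Int × Int × Bool :=
  let v := PySem.List.pyGetD sir i 0
  if v = 2 then (st.1 ++ [3], st.2.1, true)
  else if v = 1 ∧ infNbB sir n i = true then (st.1 ++ [2], st.2.1 + 1, st.2.2)
  else (st.1 ++ [v], st.2.1, st.2.2)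

def step_sir_alt (sir_grid : List Int) (n : Int) : List Int × Int × Bool :=
  let st := (PySem.List.pyRange 0 (n * n) 1).foldl (stepBOut sir_grid n) ([], 0, false)
  (st.1 ++ PySem.List.slice sir_grid (some (n * n)) none, st.2.1, st.2.2)

-- ===== PRECONDITION & SPEC =====
-- Pre_ is exactly where A returns: for n*n > len(sir_grid) the loop indexes past the end of
-- sir_grid and raises IndexError.
def Pre_step_sir (sir_grid : List Int) (n : Int) : Prop := n * n ≤ (sir_grid.length : Int)
instance (sir_grid : List Int) (n : Int) : Decidable (Pre_step_sir sir_grid n) := by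
  unfold Pre_step_sir; infer_instance

def pvWitness_step_sir : List Int × Int := ([1, 2, 1, 0], 2)

def Spec_step_sir (sir_grid : List Int) (n : Int) (out : List Int × Int × Bool) : Prop :=
  out = step_sir_alt sir_grid n
instance (sir_grid : List Int) (n : Int) (out : List Int × Int × Bool) :
    Decidable (Spec_step_sir sir_grid n out) := by unfold Spec_step_sir; infer_instance

-- ===== CLAIM (what is proved, stated in full; the proofs are below) =====
def Claim_equal_step_sir : Prop := ∀ (sir_grid : List Int) (n : Int), Dom_step_sir sir_grid n →
  Pre_step_sir sir_grid n → Spec_step_sir sir_grid n (step_sir sir_grid n)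

-- ===== LEMMAS AND PROOFS =====

-- original value of cell j
def sv (sir : List Int) (j : Int) : Int := PySem.List.pyGetD sir j 0

-- "cell j has an infected pull-neighbour that A has already processed (index < k)"
def pullK (sir : List Int) (n k j : Int) : Bool :=
  let r := PySem.Int.floordiv j n
  let c := PySem.Int.mod j n
  (decide (0 < r) && (sv sir (j - n) == 2) && decide (j - n < k)) ||
  (decide (r < n - 1) && (sv sir (j + n) == 2) && decide (j + n < k)) ||
  (decide (0 < c) && (sv sir (j - 1) == 2) && decide (j - 1 < k)) ||
  (decide (c < n - 1) && (sv sir (j + 1) == 2) && decide (j + 1 < k))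

-- value of cell j (< n*n) after A has processed cells [0, k)
def valK (sir : List Int) (n k j : Int) : Int :=
  if sv sir j = 2 ∧ j < k then 3
  else if sv sir j = 1 ∧ pullK sir n k j = true then 2
  else sv sir j

-- B's per-cell output value
def outB (sir : List Int) (n j : Int) : Int :=
  if sv sir j = 2 then 3
  else if sv sir j = 1 ∧ infNbB sir n j = true then 2
  else sv sir j

theorem coords_eq (n a q s : Int) (hn : 0 < n) (h : a = n * q + s) (h0 : 0 ≤ s) (h1 : s < n) :
    PySem.Int.floordiv a n = q ∧ PySem.Int.mod a n = s := by
  have hq : PySem.Int.floordiv a n = q := by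
    rw [PySem.Int.floordiv_eq_iff_of_pos hn]
    constructor <;> nlinarith
  refine ⟨hq, ?_⟩
  have := PySem.Int.floordiv_mul_add_mod a n
  rw [hq] at this; linarith

theorem coords_self (n a : Int) (hn : 0 < n) (ha : 0 ≤ a) (hm : a < n * n) :
    a = n * PySem.Int.floordiv a n + PySem.Int.mod a n ∧
    0 ≤ PySem.Int.mod a n ∧ PySem.Int.mod a n < n ∧
    0 ≤ PySem.Int.floordiv a n ∧ PySem.Int.floordiv a n < n := by
  have h1 := PySem.Int.floordiv_mul_add_mod a n
  have h2 := PySem.Int.mod_nonneg a hn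
  have h3 := PySem.Int.mod_lt a hn
  refine ⟨by linarith, h2, h3, ?_, ?_⟩ <;> nlinarith

theorem guards_off (n j : Int) (hn : n ≤ 0) (hj : 0 ≤ j) (hm : j < n * n) :
    ¬ 0 < PySem.Int.floordiv j n ∧ ¬ PySem.Int.floordiv j n < n - 1 ∧
    ¬ 0 < PySem.Int.mod j n ∧ ¬ PySem.Int.mod j n < n - 1 := by
  rcases lt_or_eq_of_le hn with hn' | hn'
  · have h1 := PySem.Int.floordiv_mul_add_mod j n
    have h2 := PySem.Int.mod_neg_bounds j hn'
    refine ⟨?_, ?_, by omega, by omega⟩ <;> nlinarith [h2.1, h2.2]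
  · subst hn'; simp at hm; omega

theorem mem_nbrsA (n k j : Int) :
    j ∈ nbrsA n k ↔
      (0 < PySem.Int.floordiv k n ∧ j = k - n) ∨
      (PySem.Int.floordiv k n < n - 1 ∧ j = k + n) ∨
      (0 < PySem.Int.mod k n ∧ j = k - 1) ∨
      (PySem.Int.mod k n < n - 1 ∧ j = k + 1) := by
  simp [nbrsA, List.mem_append]

theorem push_iff_pull (n k j : Int) (hn : 0 < n) (hj0 : 0 ≤ j)
    (hjm : j < n * n) (hk0 : 0 ≤ k) (hkm : k < n * n) :
    ((0 < PySem.Int.floordiv j n ∧ j - n = k) ∨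
     (PySem.Int.floordiv j n < n - 1 ∧ j + n = k) ∨
     (0 < PySem.Int.mod j n ∧ j - 1 = k) ∨
     (PySem.Int.mod j n < n - 1 ∧ j + 1 = k)) ↔ j ∈ nbrsA n k := by
  obtain ⟨hj1, hj2, hj3, hj4, hj5⟩ := coords_self n j hn hj0 hjm
  obtain ⟨hk1, hk2, hk3, hk4, hk5⟩ := coords_self n k hn hk0 hkm
  rw [mem_nbrsA]
  constructor
  · rintro (⟨h, he⟩ | ⟨h, he⟩ | ⟨h, he⟩ | ⟨h, he⟩)
    · obtain ⟨hR, hC⟩ := coords_eq n k (PySem.Int.floordiv j n - 1) (PySem.Int.mod j n) hn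
        (by linear_combination -he + hj1) hj2 hj3
      omega
    · obtain ⟨hR, hC⟩ := coords_eq n k (PySem.Int.floordiv j n + 1) (PySem.Int.mod j n) hn
        (by linear_combination -he + hj1) hj2 hj3
      omega
    · obtain ⟨hR, hC⟩ := coords_eq n k (PySem.Int.floordiv j n) (PySem.Int.mod j n - 1) hn
        (by linear_combination -he + hj1) (by omega) (by omega)
      omega
    · obtain ⟨hR, hC⟩ := coords_eq n k (PySem.Int.floordiv j n) (PySem.Int.mod j n + 1) hn
        (by linear_combination -he + hj1) (by omega) (by omega)
      omega
  · rintro (⟨h, he⟩ | ⟨h, he⟩ | ⟨h, he⟩ | ⟨h, he⟩)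
    · obtain ⟨hR, hC⟩ := coords_eq n j (PySem.Int.floordiv k n - 1) (PySem.Int.mod k n) hn
        (by linear_combination he + hk1) hk2 hk3
      omega
    · obtain ⟨hR, hC⟩ := coords_eq n j (PySem.Int.floordiv k n + 1) (PySem.Int.mod k n) hn
        (by linear_combination he + hk1) hk2 hk3
      omega
    · obtain ⟨hR, hC⟩ := coords_eq n j (PySem.Int.floordiv k n) (PySem.Int.mod k n - 1) hn
        (by linear_combination he + hk1) (by omega) (by omega)
      omega
    · obtain ⟨hR, hC⟩ := coords_eq n j (PySem.Int.floordiv k n) (PySem.Int.mod k n + 1) hn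
        (by linear_combination he + hk1) (by omega) (by omega)
      omega

theorem pullK_step (sir : List Int) (n k j : Int) (hk0 : 0 ≤ k) (hkm : k < n * n)
    (hj0 : 0 ≤ j) (hjm : j < n * n) :
    pullK sir n (k + 1) j =
      (pullK sir n k j || (sv sir k == 2 && decide (j ∈ nbrsA n k))) := by
  rcases (by omega : n ≤ 0 ∨ 0 < n) with hn | hn
  · have gj := guards_off n j hn hj0 hjm
    have gk := guards_off n k hn hk0 hkm
    have hnm : ¬ (j ∈ nbrsA n k) := by rw [mem_nbrsA]; tauto
    simp [pullK, gj.1, gj.2.1, gj.2.2.1, gj.2.2.2, hnm]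
  · have hp := push_iff_pull n k j hn hj0 hjm hk0 hkm
    rw [Bool.eq_iff_iff]
    simp only [pullK, Bool.or_eq_true, Bool.and_eq_true, decide_eq_true_eq, beq_iff_eq, and_assoc]
    constructor
    · rintro (((⟨hg, hs, hlt⟩ | ⟨hg, hs, hlt⟩) | ⟨hg, hs, hlt⟩) | ⟨hg, hs, hlt⟩)
      · rcases lt_or_eq_of_le (Int.lt_add_one_iff.mp hlt) with h | h
        · exact Or.inl (Or.inl (Or.inl (Or.inl ⟨hg, hs, h⟩)))
        · exact Or.inr ⟨by rw [← h]; exact hs, hp.mp (Or.inl ⟨hg, h⟩)⟩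
      · rcases lt_or_eq_of_le (Int.lt_add_one_iff.mp hlt) with h | h
        · exact Or.inl (Or.inl (Or.inl (Or.inr ⟨hg, hs, h⟩)))
        · exact Or.inr ⟨by rw [← h]; exact hs, hp.mp (Or.inr (Or.inl ⟨hg, h⟩))⟩
      · rcases lt_or_eq_of_le (Int.lt_add_one_iff.mp hlt) with h | h
        · exact Or.inl (Or.inl (Or.inr ⟨hg, hs, h⟩))
        · exact Or.inr ⟨by rw [← h]; exact hs, hp.mp (Or.inr (Or.inr (Or.inl ⟨hg, h⟩)))⟩
      · rcases lt_or_eq_of_le (Int.lt_add_one_iff.mp hlt) with h | h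
        · exact Or.inl (Or.inr ⟨hg, hs, h⟩)
        · exact Or.inr ⟨by rw [← h]; exact hs, hp.mp (Or.inr (Or.inr (Or.inr ⟨hg, h⟩)))⟩
    · rintro ((((⟨hg, hs, hlt⟩ | ⟨hg, hs, hlt⟩) | ⟨hg, hs, hlt⟩) | ⟨hg, hs, hlt⟩) | ⟨hs, hmem⟩)
      · exact Or.inl (Or.inl (Or.inl ⟨hg, hs, by omega⟩))
      · exact Or.inl (Or.inl (Or.inr ⟨hg, hs, by omega⟩))
      · exact Or.inl (Or.inr ⟨hg, hs, by omega⟩)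
      · exact Or.inr ⟨hg, hs, by omega⟩
      · rcases hp.mpr hmem with ⟨hg, he⟩ | ⟨hg, he⟩ | ⟨hg, he⟩ | ⟨hg, he⟩
        · exact Or.inl (Or.inl (Or.inl ⟨hg, by rw [he]; exact hs, by omega⟩))
        · exact Or.inl (Or.inl (Or.inr ⟨hg, by rw [he]; exact hs, by omega⟩))
        · exact Or.inl (Or.inr ⟨hg, by rw [he]; exact hs, by omega⟩)
        · exact Or.inr ⟨hg, by rw [he]; exact hs, by omega⟩

theorem pullK_zero (sir : List Int) (n j : Int) (hj0 : 0 ≤ j) (hjm : j < n * n) :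
    pullK sir n 0 j = false := by
  rcases (by omega : n ≤ 0 ∨ 0 < n) with hn | hn
  · have gj := guards_off n j hn hj0 hjm
    simp [pullK, gj.1, gj.2.1, gj.2.2.1, gj.2.2.2]
  · obtain ⟨hj1, hj2, hj3, hj4, hj5⟩ := coords_self n j hn hj0 hjm
    apply Bool.eq_false_iff.mpr
    intro h
    simp only [pullK, Bool.or_eq_true, Bool.and_eq_true, decide_eq_true_eq, beq_iff_eq,
      and_assoc] at h
    rcases h with ((⟨hg, _, hlt⟩ | ⟨hg, _, hlt⟩) | ⟨hg, _, hlt⟩) | ⟨hg, _, hlt⟩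
    · nlinarith
    · linarith
    · nlinarith
    · linarith

theorem pullK_final (sir : List Int) (n j : Int) (hj0 : 0 ≤ j) (hjm : j < n * n) :
    pullK sir n (n * n) j = infNbB sir n j := by
  rcases (by omega : n ≤ 0 ∨ 0 < n) with hn | hn
  · have gj := guards_off n j hn hj0 hjm
    simp [pullK, infNbB, gj.1, gj.2.1, gj.2.2.1, gj.2.2.2]
  · obtain ⟨hj1, hj2, hj3, hj4, hj5⟩ := coords_self n j hn hj0 hjm
    rw [Bool.eq_iff_iff]
    simp only [pullK, infNbB, Bool.or_eq_true, Bool.and_eq_true, decide_eq_true_eq,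
      beq_iff_eq, and_assoc, sv]
    constructor
    · rintro (((⟨hg, hs, _⟩ | ⟨hg, hs, _⟩) | ⟨hg, hs, _⟩) | ⟨hg, hs, _⟩)
      · exact Or.inl (Or.inl (Or.inl ⟨hg, hs⟩))
      · exact Or.inl (Or.inl (Or.inr ⟨hg, hs⟩))
      · exact Or.inl (Or.inr ⟨hg, hs⟩)
      · exact Or.inr ⟨hg, hs⟩
    · rintro (((⟨hg, hs⟩ | ⟨hg, hs⟩) | ⟨hg, hs⟩) | ⟨hg, hs⟩)
      · exact Or.inl (Or.inl (Or.inl ⟨hg, hs, by linarith⟩))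
      · exact Or.inl (Or.inl (Or.inr ⟨hg, hs, by nlinarith⟩))
      · exact Or.inl (Or.inr ⟨hg, hs, by linarith⟩)
      · exact Or.inr ⟨hg, hs, by nlinarith⟩

theorem nbrsA_props (n k : Int) (hk0 : 0 ≤ k) (hkm : k < n * n) :
    (nbrsA n k).Nodup ∧ ∀ x ∈ nbrsA n k, 0 ≤ x ∧ x < n * n := by
  rcases (by omega : n ≤ 0 ∨ 0 < n) with hn | hn
  · have gk := guards_off n k hn hk0 hkm
    have : nbrsA n k = [] := by
      simp [nbrsA, gk.1, gk.2.1, gk.2.2.1, gk.2.2.2]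
    simp [this]
  · obtain ⟨hk1, hk2, hk3, hk4, hk5⟩ := coords_self n k hn hk0 hkm
    constructor
    · by_cases c1 : 0 < PySem.Int.floordiv k n <;>
      by_cases c2 : PySem.Int.floordiv k n < n - 1 <;>
      by_cases c3 : 0 < PySem.Int.mod k n <;>
      by_cases c4 : PySem.Int.mod k n < n - 1 <;>
        simp [nbrsA, c1, c2, c3, c4] <;> omega
    · intro x hx
      rw [mem_nbrsA] at hx
      rcases hx with ⟨hg, he⟩ | ⟨hg, he⟩ | ⟨hg, he⟩ | ⟨hg, he⟩ <;> subst he <;> constructor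
      · nlinarith
      · linarith
      · linarith
      · nlinarith
      · nlinarith
      · linarith
      · linarith
      · nlinarith

theorem pyGetD_pySetD_int (G : List Int) (a b v : Int) (ha0 : 0 ≤ a)
    (_ha : a < (G.length : Int)) (hb0 : 0 ≤ b) (hb : b < (G.length : Int)) :
    PySem.List.pyGetD (PySem.List.pySetD G a v) b 0 =
      if b = a then v else PySem.List.pyGetD G b 0 := by
  rw [PySem.List.pySetD_of_nonneg G v ha0,
    PySem.List.pyGetD_eq_getElem _ 0 hb0 (by simpa using hb),
    PySem.List.pyGetD_eq_getElem _ 0 hb0 hb]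
  rw [List.getElem_set]
  split
  · split
    · rfl
    · omega
  · split
    · omega
    · rfl

theorem countP_or {α : Type} (r : List α) (p q : α → Bool) :
    r.countP (fun x => p x || q x) =
      r.countP p + r.countP (fun x => q x && !p x) := by
  induction r with
  | nil => simp
  | cons a t ih =>
    simp only [List.countP_cons, ih]
    cases hp : p a <;> cases hq : q a <;> simp [hp, hq] <;> try omega

theorem countP_mem_and (r : List Int) (X : Int → Bool) (hr : r.Nodup) :
    ∀ l : List Int, l.Nodup → (∀ x ∈ l, x ∈ r) →
      r.countP (fun x => decide (x ∈ l) && X x) = l.countP X := by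
  intro l
  induction l generalizing r with
  | nil => intro _ _; simp
  | cons a t ih =>
    intro hl hsub
    have ha : a ∈ r := hsub a (by simp)
    have hat : a ∉ t := (List.nodup_cons.mp hl).1
    have step : (fun x => decide (x ∈ a :: t) && X x) =
        fun x => (x == a && X x) || (decide (x ∈ t) && X x) := by
      funext x
      by_cases hxa : x = a
      · subst hxa; simp
      · simp [hxa]
    rw [step, countP_or]
    have h1 : r.countP (fun x => x == a && X x) = if X a then 1 else 0 := by
      cases hXa : X a
      · rw [List.countP_eq_zero.mpr]
        · simp
        · intro x _
          by_cases hxa : x = a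
          · subst hxa; simp [hXa]
          · simp [hxa]
      · have : r.countP (fun x => x == a && X x) = r.countP (fun x => x == a) := by
          apply List.countP_congr
          intro x _
          by_cases hxa : x = a
          · subst hxa; simp [hXa]
          · simp [hxa]
        rw [this]
        simpa [List.count] using List.count_eq_one_of_mem hr ha
    have h2 : r.countP (fun x => (decide (x ∈ t) && X x) && !(x == a && X x)) =
        r.countP (fun x => decide (x ∈ t) && X x) := by
      apply List.countP_congr
      intro x _
      by_cases hxt : x ∈ t
      · have hxa : x ≠ a := fun h => hat (h ▸ hxt)
        simp [hxt, hxa]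
      · simp [hxt]
    rw [h1, h2, ih r hr (List.nodup_cons.mp hl).2 (fun x hx => hsub x (List.mem_cons_of_mem a hx)),
      List.countP_cons]
    cases hXa : X a <;> simp [hXa]
    omega

theorem innerA (sir : List Int) :
    ∀ (l : List Int) (G : List Int) (cnt : Int), l.Nodup →
      (∀ x ∈ l, 0 ≤ x ∧ x < (G.length : Int)) →
      (l.foldl (stepAInner sir) (G, cnt)).1.length = G.length ∧
      (∀ j : Int, 0 ≤ j → j < (G.length : Int) →
        PySem.List.pyGetD (l.foldl (stepAInner sir) (G, cnt)).1 j 0 =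
          if j ∈ l ∧ sv sir j = 1 ∧ PySem.List.pyGetD G j 0 = 1 then 2
          else PySem.List.pyGetD G j 0) ∧
      (l.foldl (stepAInner sir) (G, cnt)).2 =
        cnt + (l.countP (fun nb => sv sir nb == 1 && (PySem.List.pyGetD G nb 0 == 1)) : Int) := by
  intro l
  induction l with
  | nil => intro G cnt _ _; refine ⟨rfl, ?_, by simp⟩; intro j _ _; simp
  | cons nb t ih =>
    intro G cnt hl hmem
    have hnbt : nb ∉ t := (List.nodup_cons.mp hl).1
    have htn : t.Nodup := (List.nodup_cons.mp hl).2
    obtain ⟨hnb0, hnbl⟩ := hmem nb (by simp)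
    by_cases hcond : PySem.List.pyGetD sir nb 0 = 1 ∧ PySem.List.pyGetD G nb 0 = 1
    · have hstep : (nb :: t).foldl (stepAInner sir) (G, cnt) =
          t.foldl (stepAInner sir) (PySem.List.pySetD G nb 2, cnt + 1) := by
        simp [stepAInner, hcond]
      have hlen : (PySem.List.pySetD G nb 2).length = G.length := by
        simp [PySem.List.length_pySetD]
      obtain ⟨ih1, ih2, ih3⟩ := ih (PySem.List.pySetD G nb 2) (cnt + 1) htn
        (fun x hx => by rw [hlen]; exact hmem x (List.mem_cons_of_mem nb hx))
      rw [hstep]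
      refine ⟨by rw [ih1, hlen], ?_, ?_⟩
      · intro j hj0 hjl
        rw [ih2 j hj0 (by rw [hlen] at *; exact_mod_cast (by exact_mod_cast hjl : j < (G.length : Int)))]
        rw [pyGetD_pySetD_int G nb j 2 hnb0 hnbl hj0 hjl]
        by_cases hjnb : j = nb
        · subst hjnb
          simp [hnbt, hcond.1, hcond.2, sv]
        · rw [if_neg hjnb]
          have : (j ∈ nb :: t) ↔ (j ∈ t) := by simp [hjnb]
          by_cases hjm : j ∈ t ∧ sv sir j = 1 ∧ PySem.List.pyGetD G j 0 = 1
          · rw [if_pos hjm, if_pos ⟨List.mem_cons_of_mem nb hjm.1, hjm.2⟩]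
          · rw [if_neg hjm, if_neg (by rintro ⟨h1, h2⟩; exact hjm ⟨this.mp h1, h2⟩)]
      · rw [ih3]
        have hc : t.countP (fun x => sv sir x == 1 &&
            (PySem.List.pyGetD (PySem.List.pySetD G nb 2) x 0 == 1)) =
            t.countP (fun x => sv sir x == 1 && (PySem.List.pyGetD G x 0 == 1)) := by
          apply List.countP_congr
          intro x hx
          obtain ⟨hx0, hxl⟩ := hmem x (List.mem_cons_of_mem nb hx)
          rw [pyGetD_pySetD_int G nb x 2 hnb0 hnbl hx0 hxl,
            if_neg (fun h => hnbt (by rw [← h]; exact hx))]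
        rw [hc, List.countP_cons]
        have : (sv sir nb == 1 && (PySem.List.pyGetD G nb 0 == 1)) = true := by
          simp [sv, hcond.1, hcond.2]
        rw [this]
        simp only [reduceIte]
        push_cast
        omega
    · have hstep : (nb :: t).foldl (stepAInner sir) (G, cnt) =
          t.foldl (stepAInner sir) (G, cnt) := by
        simp only [List.foldl_cons, stepAInner, if_neg hcond]
      obtain ⟨ih1, ih2, ih3⟩ := ih G cnt htn
        (fun x hx => hmem x (List.mem_cons_of_mem nb hx))
      rw [hstep]
      refine ⟨ih1, ?_, ?_⟩
      · intro j hj0 hjl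
        rw [ih2 j hj0 hjl]
        by_cases hjnb : j = nb
        · subst hjnb
          rw [if_neg (fun h => hnbt h.1), if_neg (by rintro ⟨_, h1, h2⟩; exact hcond ⟨h1, h2⟩)]
        · have : (j ∈ nb :: t) ↔ (j ∈ t) := by simp [hjnb]
          by_cases hjm : j ∈ t ∧ sv sir j = 1 ∧ PySem.List.pyGetD G j 0 = 1
          · rw [if_pos hjm, if_pos ⟨List.mem_cons_of_mem nb hjm.1, hjm.2⟩]
          · rw [if_neg hjm, if_neg (by rintro ⟨h1, h2⟩; exact hjm ⟨this.mp h1, h2⟩)]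
      · rw [ih3, List.countP_cons]
        have : (sv sir nb == 1 && (PySem.List.pyGetD G nb 0 == 1)) = false := by
          rcases not_and_or.mp hcond with h | h <;> simp [sv, h]
        rw [this]
        simp

theorem valK_zero (sir : List Int) (n j : Int) (hj0 : 0 ≤ j) (hjm : j < n * n) :
    valK sir n 0 j = sv sir j := by
  have h : ¬ j < (0 : Int) := by omega
  simp [valK, h, pullK_zero sir n j hj0 hjm]

theorem valK_succ_not2 (sir : List Int) (n k j : Int) (hsv : sv sir k ≠ 2)
    (hk0 : 0 ≤ k) (hkm : k < n * n) (hj0 : 0 ≤ j) (hjm : j < n * n) :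
    valK sir n (k + 1) j = valK sir n k j := by
  have hb : (sv sir k == 2) = false := by simp [hsv]
  have hjk : sv sir j = 2 → j ≠ k := fun h2 he => hsv (he ▸ h2)
  by_cases h2 : sv sir j = 2 <;> by_cases h1 : sv sir j = 1 <;>
    by_cases hp : pullK sir n k j = true <;> by_cases hl : j < k <;>
      (try simp_all [valK, pullK_step sir n k j hk0 hkm hj0 hjm]) <;>
      (try omega)

theorem valK_succ_self (sir : List Int) (n k : Int) (hsv : sv sir k = 2) :
    valK sir n (k + 1) k = 3 := by
  rw [valK, if_pos ⟨hsv, by omega⟩]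

theorem valK_succ_2 (sir : List Int) (n k j : Int) (hsv : sv sir k = 2) (hjk : j ≠ k)
    (hk0 : 0 ≤ k) (hkm : k < n * n) (hj0 : 0 ≤ j) (hjm : j < n * n) :
    valK sir n (k + 1) j =
      if j ∈ nbrsA n k ∧ sv sir j = 1 ∧ valK sir n k j = 1 then 2 else valK sir n k j := by
  have hb : (sv sir k == 2) = true := by simp [hsv]
  have hlt1 : (j < k + 1) ↔ j < k := by omega
  by_cases h2 : sv sir j = 2 <;> by_cases h1 : sv sir j = 1 <;>
    by_cases hp : pullK sir n k j = true <;> by_cases hm : j ∈ nbrsA n k <;>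
      by_cases hl : j < k <;>
        (try simp_all [valK, pullK_step sir n k j hk0 hkm hj0 hjm, hlt1]) <;>
        (try omega)

theorem invA (sir : List Int) (n : Int) (hpre : n * n ≤ (sir.length : Int)) :
    ∀ t : Nat, (t : Int) ≤ n * n →
      ((PySem.List.pyRange 0 (t : Int) 1).foldl (stepAOut sir n) (sir, 0, false)).1.length
          = sir.length ∧
      (∀ j : Int, 0 ≤ j → j < n * n →
        PySem.List.pyGetD
          ((PySem.List.pyRange 0 (t : Int) 1).foldl (stepAOut sir n) (sir, 0, false)).1 j 0 =
          valK sir n (t : Int) j) ∧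
      (∀ j : Int, n * n ≤ j → j < (sir.length : Int) →
        PySem.List.pyGetD
          ((PySem.List.pyRange 0 (t : Int) 1).foldl (stepAOut sir n) (sir, 0, false)).1 j 0 =
          sv sir j) ∧
      ((PySem.List.pyRange 0 (t : Int) 1).foldl (stepAOut sir n) (sir, 0, false)).2.1 =
        ((PySem.List.pyRange 0 (n * n) 1).countP
          (fun j => sv sir j == 1 && pullK sir n (t : Int) j) : Int) ∧
      ((PySem.List.pyRange 0 (t : Int) 1).foldl (stepAOut sir n) (sir, 0, false)).2.2 =
        (PySem.List.pyRange 0 (t : Int) 1).any (fun j => sv sir j == 2) := by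
  intro t
  induction t with
  | zero =>
    intro _
    simp only [Nat.cast_zero]
    rw [PySem.List.pyRange_one_eq_nil (le_refl 0)]
    simp only [List.foldl_nil]
    refine ⟨by simp, ?_, fun j _ _ => rfl, ?_, by simp⟩
    · intro j hj0 hjm
      exact (valK_zero sir n j hj0 hjm).symm
    · rw [List.countP_eq_zero.mpr]
      · simp
      · intro j hj
        obtain ⟨hj0, hjm⟩ := (PySem.List.mem_pyRange_one).mp hj
        simp [pullK_zero sir n j hj0 hjm]
  | succ t ih =>
    intro hle
    push_cast at hle ⊢
    have ht0 : (0 : Int) ≤ (t : Int) := by positivity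
    have hlt : (t : Int) < n * n := by linarith
    obtain ⟨ih1, ih2, ih3, ih4, ih5⟩ := ih (by linarith)
    have hsplit : PySem.List.pyRange 0 ((t : Int) + 1) 1 =
        PySem.List.pyRange 0 (t : Int) 1 ++ [(t : Int)] := PySem.List.pyRange_one_succ_right ht0
    rw [hsplit, List.foldl_append]
    simp only [List.foldl_cons, List.foldl_nil]
    by_cases hsv : PySem.List.pyGetD sir (t : Int) 0 = 2
    · -- infected cell: neighbours pushed, cell recovered
      have hsv' : sv sir (t : Int) = 2 := hsv
      obtain ⟨hnd, hbnds⟩ := nbrsA_props n (t : Int) ht0 hlt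
      set S := (PySem.List.pyRange 0 (t : Int) 1).foldl (stepAOut sir n) (sir, 0, false) with hS
      have hstep : stepAOut sir n S (t : Int) =
          (PySem.List.pySetD ((nbrsA n (t : Int)).foldl (stepAInner sir) (S.1, S.2.1)).1 (t : Int) 3,
           ((nbrsA n (t : Int)).foldl (stepAInner sir) (S.1, S.2.1)).2, true) := by
        simp only [stepAOut]
        rw [if_neg (not_not_intro hsv)]
      obtain ⟨in1, in2, in3⟩ := innerA sir (nbrsA n (t : Int)) S.1 S.2.1 hnd
        (fun x hx => by rw [ih1]; exact ⟨(hbnds x hx).1, by linarith [(hbnds x hx).2]⟩)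
      rw [hstep]
      have hlen : (PySem.List.pySetD ((nbrsA n (t : Int)).foldl (stepAInner sir) (S.1, S.2.1)).1
          (t : Int) 3).length = sir.length := by
        rw [PySem.List.length_pySetD, in1, ih1]
      refine ⟨hlen, ?_, ?_, ?_, ?_⟩
      · -- grid cells < n*n
        intro j hj0 hjm
        have hjlen : j < (S.1.length : Int) := by rw [ih1]; linarith
        rw [pyGetD_pySetD_int _ (t : Int) j 3 ht0 (by rw [in1, ih1]; linarith) hj0
          (by rw [in1, ih1]; linarith)]
        by_cases hjt : j = (t : Int)
        · rw [if_pos hjt, hjt, valK_succ_self sir n (t : Int) hsv']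
        · rw [if_neg hjt, in2 j hj0 hjlen,
            valK_succ_2 sir n (t : Int) j hsv' hjt ht0 hlt hj0 hjm, ih2 j hj0 hjm]
      · -- grid cells ≥ n*n untouched
        intro j hjm hjlen
        have hjt : j ≠ (t : Int) := by omega
        have hj0 : 0 ≤ j := by linarith
        rw [pyGetD_pySetD_int _ (t : Int) j 3 ht0 (by rw [in1, ih1]; linarith) hj0
          (by rw [in1, ih1]; exact hjlen), if_neg hjt,
          in2 j hj0 (by rw [ih1]; exact hjlen)]
        have hnotmem : j ∉ nbrsA n (t : Int) := fun hmem => by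
          have := (hbnds j hmem).2; omega
        rw [if_neg (fun h => hnotmem h.1), ih3 j hjm hjlen]
      · -- newly_infected counter
        rw [in3, ih4]
        have hcongr1 : (nbrsA n (t : Int)).countP
            (fun nb => sv sir nb == 1 && (PySem.List.pyGetD S.1 nb 0 == 1)) =
            (nbrsA n (t : Int)).countP
            (fun nb => sv sir nb == 1 && !(pullK sir n (t : Int) nb)) := by
          apply List.countP_congr
          intro x hx
          obtain ⟨hx0, hxm⟩ := hbnds x hx
          rw [ih2 x hx0 hxm]
          by_cases h1 : sv sir x = 1
          · by_cases hp : pullK sir n (t : Int) x = true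
            · simp [valK, h1, hp]
            · simp [valK, h1, hp]
          · simp [h1]
        have hkey : (PySem.List.pyRange 0 (n * n) 1).countP
            (fun j => sv sir j == 1 && pullK sir n ((t : Int) + 1) j) =
            (PySem.List.pyRange 0 (n * n) 1).countP
              (fun j => sv sir j == 1 && pullK sir n (t : Int) j) +
            (nbrsA n (t : Int)).countP
              (fun nb => sv sir nb == 1 && !(pullK sir n (t : Int) nb)) := by
          have hstep2 : ∀ j ∈ PySem.List.pyRange 0 (n * n) 1,
              (sv sir j == 1 && pullK sir n ((t : Int) + 1) j) =
              ((sv sir j == 1 && pullK sir n (t : Int) j) ||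
               (decide (j ∈ nbrsA n (t : Int)) && (sv sir j == 1 &&
                 !(pullK sir n (t : Int) j)))) := by
            intro j hj
            obtain ⟨hj0, hjm⟩ := (PySem.List.mem_pyRange_one).mp hj
            rw [pullK_step sir n (t : Int) j ht0 hlt hj0 hjm]
            have : (sv sir (t : Int) == 2) = true := by simp [hsv']
            rw [this]
            by_cases hd : j ∈ nbrsA n (t : Int) <;>
              cases hsv1 : sv sir j == 1 <;> cases hpk : pullK sir n (t : Int) j <;>
                simp [hd, hsv1, hpk]
          rw [List.countP_congr (fun x hx => by rw [hstep2 x hx]), countP_or]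
          congr 1
          have := countP_mem_and (PySem.List.pyRange 0 (n * n) 1)
            (fun x => sv sir x == 1 && !(pullK sir n (t : Int) x))
            (PySem.List.nodup_pyRange_one 0 (n * n))
            (nbrsA n (t : Int)) hnd
            (fun x hx => (PySem.List.mem_pyRange_one).mpr ⟨(hbnds x hx).1, (hbnds x hx).2⟩)
          rw [← this]
          apply List.countP_congr
          intro x _
          by_cases hd : x ∈ nbrsA n (t : Int) <;> cases h1 : sv sir x == 1 <;>
            cases hp : pullK sir n (t : Int) x <;> simp [hd, h1, hp]
        rw [hkey, hcongr1]
        push_cast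
        ring
      · -- has_active
        rw [List.any_append]
        simp [hsv']
    · -- not infected: state unchanged
      have hstep : stepAOut sir n
          ((PySem.List.pyRange 0 (t : Int) 1).foldl (stepAOut sir n) (sir, 0, false)) (t : Int) =
          (PySem.List.pyRange 0 (t : Int) 1).foldl (stepAOut sir n) (sir, 0, false) := by
        simp only [stepAOut]
        rw [if_pos hsv]
      rw [hstep]
      have hsv' : sv sir (t : Int) ≠ 2 := hsv
      refine ⟨ih1, ?_, ih3, ?_, ?_⟩
      · intro j hj0 hjm
        rw [ih2 j hj0 hjm, ← valK_succ_not2 sir n (t : Int) j hsv' ht0 hlt hj0 hjm]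
      · rw [ih4]
        congr 1
        apply List.countP_congr
        intro j hj
        obtain ⟨hj0, hjm⟩ := (PySem.List.mem_pyRange_one).mp hj
        rw [pullK_step sir n (t : Int) j ht0 hlt hj0 hjm]
        have : (sv sir (t : Int) == 2) = false := by simp [hsv']
        rw [this]
        simp
      · rw [List.any_append]
        simp [hsv', ih5]

theorem invB (sir : List Int) (n : Int) :
    ∀ t : Nat, (t : Int) ≤ n * n →
      (PySem.List.pyRange 0 (t : Int) 1).foldl (stepBOut sir n) ([], 0, false) =
        ((PySem.List.pyRange 0 (t : Int) 1).map (outB sir n),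
         ((PySem.List.pyRange 0 (t : Int) 1).countP
            (fun j => sv sir j == 1 && infNbB sir n j) : Int),
         (PySem.List.pyRange 0 (t : Int) 1).any (fun j => sv sir j == 2)) := by
  intro t
  induction t with
  | zero =>
    intro _
    simp only [Nat.cast_zero]
    rw [PySem.List.pyRange_one_eq_nil (le_refl 0)]
    simp
  | succ t ih =>
    intro hle
    push_cast at hle ⊢
    have ht0 : (0 : Int) ≤ (t : Int) := by positivity
    have hsplit : PySem.List.pyRange 0 ((t : Int) + 1) 1 =
        PySem.List.pyRange 0 (t : Int) 1 ++ [(t : Int)] := PySem.List.pyRange_one_succ_right ht0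
    rw [hsplit, List.foldl_append, ih (by linarith), List.map_append, List.countP_append,
      List.any_append]
    simp only [List.foldl_cons, List.foldl_nil]
    by_cases h2 : PySem.List.pyGetD sir (t : Int) 0 = 2
    · have h2' : sv sir (t : Int) = 2 := h2
      simp only [stepBOut, if_pos h2]
      have hb2 : (sv sir (t : Int) == 2) = true := by simp [h2']
      have hb1 : (sv sir (t : Int) == 1 && infNbB sir n (t : Int)) = false := by simp [h2']
      have ho : outB sir n (t : Int) = 3 := by rw [outB, if_pos h2']
      refine Prod.ext ?_ (Prod.ext ?_ ?_)
      · simp [ho]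
      · simp [hb1]
      · simp [hb2]
    · by_cases h1 : PySem.List.pyGetD sir (t : Int) 0 = 1 ∧ infNbB sir n (t : Int) = true
      · have h2' : ¬ sv sir (t : Int) = 2 := h2
        have h11' : sv sir (t : Int) = 1 := h1.1
        simp only [stepBOut, if_neg h2, if_pos h1]
        have hb1 : (sv sir (t : Int) == 1 && infNbB sir n (t : Int)) = true := by
          simp [h11', h1.2]
        have hb2 : (sv sir (t : Int) == 2) = false := beq_eq_false_iff_ne.mpr h2'
        have ho : outB sir n (t : Int) = 2 := by rw [outB, if_neg h2', if_pos ⟨h11', h1.2⟩]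
        refine Prod.ext ?_ (Prod.ext ?_ ?_)
        · simp [ho]
        · simp [hb1]
        · simp [hb2]
      · have h2' : ¬ sv sir (t : Int) = 2 := h2
        have h1' : ¬ (sv sir (t : Int) = 1 ∧ infNbB sir n (t : Int) = true) := h1
        simp only [stepBOut, if_neg h2, if_neg h1]
        have hb1 : (sv sir (t : Int) == 1 && infNbB sir n (t : Int)) = false := by
          rcases not_and_or.mp h1' with h | h
          · simp [beq_eq_false_iff_ne.mpr h]
          · simp [Bool.eq_false_iff.mpr h]
        have hb2 : (sv sir (t : Int) == 2) = false := beq_eq_false_iff_ne.mpr h2'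
        have ho : outB sir n (t : Int) = PySem.List.pyGetD sir (t : Int) 0 := by
          rw [outB, if_neg h2', if_neg h1']
          rfl
        refine Prod.ext ?_ (Prod.ext ?_ ?_)
        · simp [ho]
        · simp [hb1]
        · simp [hb2]

theorem valK_final (sir : List Int) (n j : Int) (hj0 : 0 ≤ j) (hjm : j < n * n) :
    valK sir n (n * n) j = outB sir n j := by
  rw [valK, outB, pullK_final sir n j hj0 hjm]
  by_cases h2 : sv sir j = 2
  · rw [if_pos ⟨h2, hjm⟩, if_pos h2]
  · rw [if_neg (fun h => h2 h.1), if_neg h2]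

theorem step_sir_eq_alt (sir : List Int) (n : Int) (hpre : n * n ≤ (sir.length : Int)) :
    step_sir sir n = step_sir_alt sir n := by
  have nn0 : (0 : Int) ≤ n * n := mul_self_nonneg n
  have htn : (((n * n).toNat : Nat) : Int) = n * n := Int.toNat_of_nonneg nn0
  set t : Nat := (n * n).toNat with ht
  have htlen : t ≤ sir.length := by omega
  obtain ⟨a1, a2, a3, a4, a5⟩ := invA sir n hpre t (by rw [htn])
  have hB := invB sir n t (by rw [htn])
  rw [step_sir, step_sir_alt, ← htn, hB]
  have hslice : PySem.List.slice sir (some ((t : Nat) : Int)) none = sir.drop t :=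
    PySem.List.slice_from_natCast sir t
  simp only [hslice]
  have hlen1 : ((PySem.List.pyRange 0 ((t : Nat) : Int) 1).map (outB sir n)).length = t := by
    rw [List.length_map, PySem.List.length_pyRange_one]
    omega
  refine Prod.ext ?_ (Prod.ext ?_ ?_)
  · apply List.ext_getElem
    · rw [a1, List.length_append, hlen1, List.length_drop]
      omega
    · intro i hi1 hi2
      have hilen : i < sir.length := by rw [a1] at hi1; exact hi1
      have hgd : ((PySem.List.pyRange 0 ((t : Nat) : Int) 1).foldl (stepAOut sir n)
          (sir, 0, false)).1[i] = PySem.List.pyGetD ((PySem.List.pyRange 0 ((t : Nat) : Int) 1).foldl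
          (stepAOut sir n) (sir, 0, false)).1 (i : Int) 0 := by
        rw [PySem.List.pyGetD_eq_getElem _ 0 (by positivity) (by rw [a1]; exact_mod_cast hilen)]
        simp
      rw [hgd]
      by_cases hit : i < t
      · rw [List.getElem_append_left (by rw [hlen1]; exact hit), List.getElem_map]
        have harg : (PySem.List.pyRange 0 ((t : Nat) : Int) 1)[i]'(by
            rw [PySem.List.length_pyRange_one]; omega) = ((i : Nat) : Int) := by
          rw [PySem.List.getElem_pyRange_one]
          omega
        rw [harg]
        have him : ((i : Nat) : Int) < n * n := by omega
        rw [a2 (i : Int) (by positivity) him, htn]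
        exact valK_final sir n (i : Int) (by positivity) him
      · rw [List.getElem_append_right (by rw [hlen1]; omega)]
        have him : n * n ≤ ((i : Nat) : Int) := by omega
        rw [a3 (i : Int) him (by exact_mod_cast hilen)]
        rw [sv, PySem.List.pyGetD_eq_getElem _ 0 (by positivity) (by exact_mod_cast hilen)]
        simp only [hlen1, List.getElem_drop]
        congr 1
        omega
  · rw [← htn] at a4
    rw [a4]
    congr 1
    apply List.countP_congr
    intro j hj
    obtain ⟨hj0, hjm⟩ := (PySem.List.mem_pyRange_one).mp hj
    have hjm' : j < n * n := by rw [← htn]; exact hjm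
    rw [htn, pullK_final sir n j hj0 hjm']
  · exact a5

-- ===== VERDICT (by name: the statement is the Claim_ definition above) =====
theorem step_sir_spec : Claim_equal_step_sir := by
  intro sir_grid n _ hpre
  show step_sir sir_grid n = step_sir_alt sir_grid n
  exact step_sir_eq_alt sir_grid n hpre
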